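-- pv_equiv track=rewrite | github.com/Av7danger/Kai | examples/bug_bounty/integrated_demo.py | _suggest_remediation_timeline
-- ===== SOURCE A (Python) =====
-- from typing import Dict, List, Optional, Any
--
-- def _suggest_remediation_timeline(vulnerabilities: List[Dict[str, Any]]) -> Dict[str, str]:
--     """Suggest remediation timeline based on severity"""
--     critical_count = len([v for v in vulnerabilities if v.get("severity") == "Critical"])
--     high_count = len([v for v in vulnerabilities if v.get("severity") == "High"])
--     medium_count = len([v for v in vulnerabilities if v.get("severity") == "Medium"])
--     low_count = len([v for v in vulnerabilities if v.get("severity") == "Low"])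
--
--     timeline = {}
--
--     if critical_count > 0:
--         timeline["Critical"] = "Immediate (0-24 hours)"
--     if high_count > 0:
--         timeline["High"] = "Urgent (1-7 days)"
--     if medium_count > 0:
--         timeline["Medium"] = "Short-term (2-4 weeks)"
--     if low_count > 0:
--         timeline["Low"] = "Medium-term (1-3 months)"
--
--     return timeline
-- ===== SOURCE B (Python) =====
-- from typing import Dict, List, Any
--
-- _TIMELINE_TABLE = {
--     "Critical": "Immediate (0-24 hours)",
--     "High": "Urgent (1-7 days)",
--     "Medium": "Short-term (2-4 weeks)",
--     "Low": "Medium-term (1-3 months)",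
-- }
--
-- def _suggest_remediation_timeline(vulnerabilities: List[Dict[str, Any]]) -> Dict[str, str]:
--     present = {v.get("severity") for v in vulnerabilities}
--     return {sev: text for sev, text in _TIMELINE_TABLE.items() if sev in present}
-- ===== Notes on version B (the rewrite author's own statement) =====
-- stated objective: simpler
-- what changed: Replaces four separate list scans and four hardcoded if-branches with one pass collecting the set of severities present plus a table-driven dict comprehension over an ordered severity->timeline table.
import Mathlib
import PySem

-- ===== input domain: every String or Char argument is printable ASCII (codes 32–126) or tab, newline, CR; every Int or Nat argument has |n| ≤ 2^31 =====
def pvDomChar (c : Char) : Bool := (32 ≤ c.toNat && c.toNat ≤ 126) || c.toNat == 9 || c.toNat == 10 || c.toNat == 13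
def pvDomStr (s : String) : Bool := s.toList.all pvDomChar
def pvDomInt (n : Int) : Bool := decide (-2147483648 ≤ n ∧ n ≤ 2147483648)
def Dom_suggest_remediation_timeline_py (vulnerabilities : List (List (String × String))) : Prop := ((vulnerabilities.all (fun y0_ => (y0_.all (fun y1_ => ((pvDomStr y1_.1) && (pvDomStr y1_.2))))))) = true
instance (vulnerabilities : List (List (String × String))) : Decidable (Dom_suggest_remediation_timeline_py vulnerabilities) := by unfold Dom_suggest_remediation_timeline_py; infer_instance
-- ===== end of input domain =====

-- ===== PORT A =====
def pvGetSeverity (v : List (String × String)) : Option String :=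
  (v.find? (fun p => p.1 == "severity")).map (·.2)

-- Port of A. dict assignment on distinct fresh keys from an empty dict is an append; exact here.
def suggest_remediation_timeline_py (vulnerabilities : List (List (String × String))) : List (String × String) :=
  let critical_count := (vulnerabilities.filter (fun v => pvGetSeverity v == some "Critical")).length
  let high_count := (vulnerabilities.filter (fun v => pvGetSeverity v == some "High")).length
  let medium_count := (vulnerabilities.filter (fun v => pvGetSeverity v == some "Medium")).length
  let low_count := (vulnerabilities.filter (fun v => pvGetSeverity v == some "Low")).length
  let timeline : List (String × String) := []
  let timeline := if critical_count > 0 then timeline ++ [("Critical", "Immediate (0-24 hours)")] else timeline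
  let timeline := if high_count > 0 then timeline ++ [("High", "Urgent (1-7 days)")] else timeline
  let timeline := if medium_count > 0 then timeline ++ [("Medium", "Short-term (2-4 weeks)")] else timeline
  let timeline := if low_count > 0 then timeline ++ [("Low", "Medium-term (1-3 months)")] else timeline
  timeline

-- ===== PORT B =====
def pvTimelineTable : List (String × String) :=
  [("Critical", "Immediate (0-24 hours)"),
   ("High", "Urgent (1-7 days)"),
   ("Medium", "Short-term (2-4 weeks)"),
   ("Low", "Medium-term (1-3 months)")]

-- Port of B: one pass building the set of severities present, then a filter of the ordered table.
def suggest_remediation_timeline_py_alt (vulnerabilities : List (List (String × String))) : List (String × String) :=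
  let present : PySem.Set (Option String) := PySem.Set.ofList (vulnerabilities.map pvGetSeverity)
  pvTimelineTable.filter (fun p => PySem.Set.contains present (some p.1))

-- ===== PRECONDITION & SPEC =====
def Spec_suggest_remediation_timeline_py (vulnerabilities : List (List (String × String))) (out : List (String × String)) : Prop := out = suggest_remediation_timeline_py_alt vulnerabilities
instance (vulnerabilities : List (List (String × String))) (out : List (String × String)) : Decidable (Spec_suggest_remediation_timeline_py vulnerabilities out) := by unfold Spec_suggest_remediation_timeline_py; infer_instance

-- ===== CLAIM (what is proved, stated in full; the proofs are below) =====
def Claim_equal_suggest_remediation_timeline_py : Prop := ∀ (vulnerabilities : List (List (String × String))), Dom_suggest_remediation_timeline_py vulnerabilities → Spec_suggest_remediation_timeline_py vulnerabilities (suggest_remediation_timeline_py vulnerabilities)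

-- ===== LEMMAS AND PROOFS =====
-- B replaces four scans + four if-branches with one pass (set of severities present) and a table filter; equivalence proved below.

lemma pv_contains_eq_count_pos (s : String) (vs : List (List (String × String))) :
    PySem.Set.contains (PySem.Set.ofList (vs.map pvGetSeverity)) (some s)
      = decide (0 < (vs.filter (fun v => pvGetSeverity v == some s)).length) := by
  rw [Bool.eq_iff_iff]
  simp only [PySem.Set.contains_iff, PySem.Set.mem_ofList, List.mem_map, decide_eq_true_eq,
    List.length_pos_iff, ne_eq, List.filter_eq_nil_iff, not_forall]
  constructor
  · rintro ⟨v, hv, h⟩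
    exact ⟨v, hv, by simp [h]⟩
  · rintro ⟨v, hv, h⟩
    exact ⟨v, hv, by simpa using h⟩

-- ===== VERDICT (by name: the statement is the Claim_ definition above) =====
theorem suggest_remediation_timeline_py_spec : Claim_equal_suggest_remediation_timeline_py := by
  intro vs _
  unfold Spec_suggest_remediation_timeline_py
  unfold suggest_remediation_timeline_py suggest_remediation_timeline_py_alt pvTimelineTable
  simp only [List.filter, pv_contains_eq_count_pos]
  by_cases hc : 0 < (vs.filter (fun v => pvGetSeverity v == some "Critical")).length <;>
  by_cases hh : 0 < (vs.filter (fun v => pvGetSeverity v == some "High")).length <;>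
  by_cases hm : 0 < (vs.filter (fun v => pvGetSeverity v == some "Medium")).length <;>
  by_cases hl : 0 < (vs.filter (fun v => pvGetSeverity v == some "Low")).length <;>
  simp [hc, hh, hm, hl]
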